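-- pv_equiv track=rewrite | github.com/CodingTestKiller/Season1 | CodingTestKiller/누적합/나누기/누적합:나누기:yireal.py | check_root
-- ===== SOURCE A (Python) =====
-- def check_root(sum_list,i,N,key,avg):
--     total = 0
--     if(i == N):
--         return 1
--     for j in range(i,N+1):
--         if(sum_list[j] == key):
--             total += check_root(sum_list,j,N,key+avg,avg)
--     return total
-- ===== SOURCE B (Python) =====
-- def check_root(sum_list, i, N, key, avg):
--     # Level-by-level counting DP (breadth-first over recursion depth) with a
--     # single prefix-sum pass per level, instead of top-down recursion.
--     if i >= N:
--         return 1 if i == N else 0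
--     m = N - i + 1
--     cnt = [0] * m
--     cnt[0] = 1          # one way to stand at position i with the initial key
--     total = 0
--     k = key
--     while any(cnt):
--         total += cnt[m - 1]   # calls that reached index N return 1 each
--         cnt[m - 1] = 0
--         new = []
--         run = 0
--         for t in range(m):
--             run += cnt[t]
--             new.append(run if sum_list[i + t] == k else 0)
--         cnt = new
--         k += avg
--     return total
-- ===== Notes on version B (the rewrite author's own statement) =====
-- stated objective: alternative
-- what changed: B replaces A's top-down recursion over segment start positions by an iterative level-by-level counting DP: a vector of path counts per position is advanced with one prefix-sum pass per recursion depth, so shared subcalls are counted once instead of re-explored.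
import Mathlib
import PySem

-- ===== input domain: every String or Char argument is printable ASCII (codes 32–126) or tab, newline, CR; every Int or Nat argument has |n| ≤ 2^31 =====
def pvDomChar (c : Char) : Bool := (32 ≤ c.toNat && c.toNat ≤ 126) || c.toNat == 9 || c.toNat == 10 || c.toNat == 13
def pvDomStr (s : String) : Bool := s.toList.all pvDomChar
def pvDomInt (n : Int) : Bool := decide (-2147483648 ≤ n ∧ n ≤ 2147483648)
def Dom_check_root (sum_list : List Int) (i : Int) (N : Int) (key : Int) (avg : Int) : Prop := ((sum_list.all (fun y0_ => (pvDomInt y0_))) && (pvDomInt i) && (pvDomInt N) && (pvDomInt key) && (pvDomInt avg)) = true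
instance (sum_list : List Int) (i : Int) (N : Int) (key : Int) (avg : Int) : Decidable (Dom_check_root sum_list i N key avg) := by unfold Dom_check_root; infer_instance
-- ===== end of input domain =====

-- B replaces A's top-down recursion by a level-by-level counting DP
-- (one prefix-sum pass per recursion depth); equivalence is about the RETURN value.

-- ===== PORT A =====
-- A's recursion, made total by a fuel guard (fuel = |sum_list| + 2 suffices on Pre_,
-- see the lemmas below); everything else is a literal transliteration of A.
def pvFA (s : List Int) (N : Int) (avg : Int) : Nat → Int → Int → Int
  | 0, _, _ => 0
  | fuel + 1, i, key =>
    if i = N then 1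
    else
      (PySem.List.pyRange i (N + 1) 1).foldl
        (fun total j =>
          if PySem.List.pyGet? s j = some key then total + pvFA s N avg fuel j (key + avg)
          else total) 0

def check_root (sum_list : List Int) (i : Int) (N : Int) (key : Int) (avg : Int) : Int :=
  pvFA sum_list N avg (sum_list.length + 2) i key

-- ===== PORT B =====
-- one level of B: run = running prefix sum of cnt, new[t] = run if sum_list[i+t] == k else 0
def pvStep (s : List Int) (i k : Int) (m : Nat) (cnt : List Int) : List Int :=
  ((List.range m).foldl
    (fun (st : Int × List Int) t =>
      let run := st.1 + cnt.getD t 0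
      (run, st.2 ++ [if PySem.List.pyGet? s (i + (t : Int)) = some k then run else 0]))
    (0, [])).2

-- B's while-loop, made total by a fuel guard (fuel = |sum_list| + 2 suffices on Pre_)
def pvLoop (s : List Int) (i N avg : Int) (m : Nat) : Nat → List Int → Int → Int → Int
  | 0, _, _, total => total
  | fuel + 1, cnt, k, total =>
    if cnt.any (fun c => c != 0) then
      pvLoop s i N avg m fuel (pvStep s i k m (cnt.set (m - 1) 0)) (k + avg)
        (total + cnt.getD (m - 1) 0)
    else total

def check_root_alt (sum_list : List Int) (i : Int) (N : Int) (key : Int) (avg : Int) : Int :=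
  if i ≥ N then (if i = N then 1 else 0)
  else
    let m := (N - i + 1).toNat
    pvLoop sum_list i N avg m (sum_list.length + 2)
      ((List.replicate m 0).set 0 1) key 0

-- ===== PRECONDITION & SPEC =====
-- Pre_ excludes exactly the inputs on which the Python A raises: an index in [i,N]
-- outside Python's index range (IndexError), and avg = 0 with a match strictly
-- before N (unbounded recursion, RecursionError).
def Pre_check_root (sum_list : List Int) (i : Int) (N : Int) (key : Int) (avg : Int) : Prop :=
  N ≤ i ∨
    (-(sum_list.length : Int) ≤ i ∧ N < (sum_list.length : Int) ∧
      (avg ≠ 0 ∨ ∀ j ∈ PySem.List.pyRange i N 1, PySem.List.pyGet? sum_list j ≠ some key))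
instance (sum_list : List Int) (i : Int) (N : Int) (key : Int) (avg : Int) : Decidable (Pre_check_root sum_list i N key avg) := by unfold Pre_check_root; infer_instance

def pvWitness_check_root : List Int × Int × Int × Int × Int := ([1, 2], 0, 1, 1, 1)

def Spec_check_root (sum_list : List Int) (i : Int) (N : Int) (key : Int) (avg : Int) (out : Int) : Prop := out = check_root_alt sum_list i N key avg
instance (sum_list : List Int) (i : Int) (N : Int) (key : Int) (avg : Int) (out : Int) : Decidable (Spec_check_root sum_list i N key avg out) := by unfold Spec_check_root; infer_instance

-- ===== CLAIM (what is proved, stated in full; the proofs are below) =====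
def Claim_equal_check_root : Prop := ∀ (sum_list : List Int) (i : Int) (N : Int) (key : Int) (avg : Int), Dom_check_root sum_list i N key avg → Pre_check_root sum_list i N key avg → Spec_check_root sum_list i N key avg (check_root sum_list i N key avg)

-- ===== LEMMAS AND PROOFS =====

-- the termination measure of A's recursion for avg ≠ 0: values still reachable by the key
def pvMeas (s : List Int) (k avg : Int) : Nat :=
  (s.toFinset.filter (fun v => if 0 < avg then k ≤ v else v ≤ k)).card

lemma pvMeas_le (s : List Int) (k avg : Int) : pvMeas s k avg ≤ s.length :=
  le_trans (Finset.card_filter_le _ _) s.toFinset_card_le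

lemma pvMeas_lt (s : List Int) (k avg : Int) (havg : avg ≠ 0) (hk : k ∈ s) :
    pvMeas s (k + avg) avg < pvMeas s k avg := by
  unfold pvMeas
  apply Finset.card_lt_card
  rw [Finset.ssubset_iff_of_subset]
  · refine ⟨k, Finset.mem_filter.mpr ⟨List.mem_toFinset.mpr hk, by split <;> omega⟩, ?_⟩
    intro hmem
    rcases Finset.mem_filter.mp hmem with ⟨-, h2⟩
    revert h2; split <;> omega
  · intro v hv
    rcases Finset.mem_filter.mp hv with ⟨h1, h2⟩
    refine Finset.mem_filter.mpr ⟨h1, ?_⟩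
    revert h2; split <;> omega

lemma pvSumList (n : Nat) (f : Nat → Int) :
    ((List.range n).map f).sum = ∑ t ∈ Finset.range n, f t := by
  induction n with
  | zero => simp
  | succ n ih => rw [List.range_succ, Finset.sum_range_succ, List.map_append, List.sum_append, ih]; simp

lemma pvFA_stable (s : List Int) (N avg : Int) (havg : avg ≠ 0) :
    ∀ f g : Nat, ∀ i k : Int, pvMeas s k avg < f → pvMeas s k avg < g →
      pvFA s N avg f i k = pvFA s N avg g i k := by
  intro f
  induction f with
  | zero => intro g i k hf; omega
  | succ f ih =>
    intro g i k hf hg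
    cases g with
    | zero => omega
    | succ g =>
      simp only [pvFA]
      split
      · rfl
      · apply PySem.List.foldl_congr_mem
        intro acc j hj
        by_cases hmatch : PySem.List.pyGet? s j = some k
        · rw [if_pos hmatch, if_pos hmatch]
          have hks : k ∈ s := PySem.List.mem_of_pyGet?_eq_some _ hmatch
          have hlt := pvMeas_lt s k avg havg hks
          rw [ih g j (k + avg) (by omega) (by omega)]
        · rw [if_neg hmatch, if_neg hmatch]

def pvFc (s : List Int) (N avg i k : Int) : Int :=
  pvFA s N avg (pvMeas s k avg + 1) i k

lemma pvFc_N (s : List Int) (N avg k : Int) : pvFc s N avg N k = 1 := by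
  simp [pvFc, pvFA]

lemma pvFc_expand (s : List Int) (N avg i k : Int) (havg : avg ≠ 0) (hiN : i ≠ N) :
    pvFc s N avg i k =
      ((PySem.List.pyRange i (N + 1) 1).map
        (fun j => if PySem.List.pyGet? s j = some k then pvFc s N avg j (k + avg) else 0)).sum := by
  conv_lhs => rw [pvFc]
  simp only [pvFA, if_neg hiN]
  rw [PySem.List.foldl_congr_mem (g := fun total j =>
    total + (if PySem.List.pyGet? s j = some k then pvFc s N avg j (k + avg) else 0))]
  · rw [PySem.List.foldl_add]; simp
  · intro acc j hj
    by_cases hmatch : PySem.List.pyGet? s j = some k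
    · rw [if_pos hmatch, if_pos hmatch]
      have hks : k ∈ s := PySem.List.mem_of_pyGet?_eq_some _ hmatch
      have hlt := pvMeas_lt s k avg havg hks
      rw [pvFc]
      congr 1
      exact pvFA_stable s N avg havg _ _ j (k + avg) (by omega) (by omega)
    · rw [if_neg hmatch, if_neg hmatch, add_zero]

lemma pvStep_aux (s : List Int) (i k : Int) (cnt : List Int) :
    ∀ (m : Nat) (r0 : Int) (acc0 : List Int),
      (List.range m).foldl
        (fun (st : Int × List Int) t =>
          let run := st.1 + cnt.getD t 0
          (run, st.2 ++ [if PySem.List.pyGet? s (i + (t : Int)) = some k then run else 0]))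
        (r0, acc0)
      = (r0 + ∑ t ∈ Finset.range m, cnt.getD t 0,
         acc0 ++ (List.range m).map (fun (u : Nat) =>
           if PySem.List.pyGet? s (i + (u : Int)) = some k
           then r0 + ∑ t ∈ Finset.range (u + 1), cnt.getD t 0 else 0)) := by
  intro m
  induction m with
  | zero => simp
  | succ m ih =>
    intro r0 acc0
    rw [List.range_succ, List.foldl_append, ih]
    simp only [List.foldl_cons, List.foldl_nil, List.map_append, List.map_cons, List.map_nil]
    rw [Finset.sum_range_succ, List.append_assoc]
    have h : r0 + ∑ x ∈ Finset.range m, cnt.getD x 0 + cnt.getD m 0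
        = r0 + (∑ x ∈ Finset.range m, cnt.getD x 0 + cnt.getD m 0) := by ring
    rw [h]

lemma pvStep_eq (s : List Int) (i k : Int) (m : Nat) (cnt : List Int) :
    pvStep s i k m cnt =
      (List.range m).map (fun (u : Nat) =>
        if PySem.List.pyGet? s (i + (u : Int)) = some k
        then ∑ t ∈ Finset.range (u + 1), cnt.getD t 0 else 0) := by
  rw [pvStep, pvStep_aux]
  simp

lemma pvStep_getD (s : List Int) (i k : Int) (m : Nat) (cnt : List Int) (u : Nat) (hu : u < m) :
    (pvStep s i k m cnt).getD u 0 =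
      if PySem.List.pyGet? s (i + (u : Int)) = some k
      then ∑ t ∈ Finset.range (u + 1), cnt.getD t 0 else 0 := by
  rw [pvStep_eq, List.getD_eq_getElem?_getD, List.getElem?_map]
  simp [List.getElem?_range hu]

lemma pvStep_len (s : List Int) (i k : Int) (m : Nat) (cnt : List Int) :
    (pvStep s i k m cnt).length = m := by
  rw [pvStep_eq]; simp

lemma pvStep_getD_zero (s : List Int) (i k : Int) (m : Nat) (cnt : List Int) (u : Nat) (hu : m ≤ u) :
    (pvStep s i k m cnt).getD u 0 = 0 := by
  rw [List.getD_eq_getElem?_getD, List.getElem?_eq_none (by rw [pvStep_len]; omega)]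
  rfl

lemma pvFilter_le_range (u n : Nat) (hu : u < n) :
    (Finset.range n).filter (fun t => t ≤ u) = Finset.range (u + 1) := by
  ext t; simp; omega

lemma pvFilter_ge_range (t n : Nat) (ht : t ≤ n) :
    (Finset.range n).filter (fun u => t ≤ u) = Finset.Ico t n := by
  ext u; simp; omega

lemma pvSum_step (s : List Int) (i N avg k : Int) (m' : Nat) (havg : avg ≠ 0)
    (hm : ((m' : Int)) = N - i) (cnt : List Int) (hlen : cnt.length = m' + 1) :
    ∑ t ∈ Finset.range (m' + 1), cnt.getD t 0 * pvFc s N avg (i + (t : Int)) k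
      = cnt.getD m' 0
        + ∑ u ∈ Finset.range (m' + 1),
            (pvStep s i k (m' + 1) (cnt.set m' 0)).getD u 0 * pvFc s N avg (i + (u : Int)) (k + avg) := by
  set X : Nat → Int := fun u =>
    if PySem.List.pyGet? s (i + (u : Int)) = some k then pvFc s N avg (i + (u : Int)) (k + avg) else 0
    with hX
  set c' : List Int := cnt.set m' 0 with hc'
  have hc'ne : ∀ t : Nat, t ≠ m' → c'.getD t 0 = cnt.getD t 0 := by
    intro t ht
    simp [hc', List.getD_eq_getElem?_getD, List.getElem?_set, ht.symm]
  have hc'self : c'.getD m' 0 = 0 := by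
    simp [hc', List.getD_eq_getElem?_getD, List.getElem?_set, hlen]
  -- step 1: split off the last index, whose position is N
  have hlast : i + ((m' : Nat) : Int) = N := by omega
  have E1 : ∑ t ∈ Finset.range (m' + 1), cnt.getD t 0 * pvFc s N avg (i + (t : Int)) k
      = cnt.getD m' 0 + ∑ t ∈ Finset.range (m' + 1), c'.getD t 0 * pvFc s N avg (i + (t : Int)) k := by
    rw [Finset.sum_range_succ, Finset.sum_range_succ, hc'self, hlast, pvFc_N, mul_one, zero_mul,
      add_zero]
    have hsum' : ∑ t ∈ Finset.range m', c'.getD t 0 * pvFc s N avg (i + (t : Int)) k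
        = ∑ t ∈ Finset.range m', cnt.getD t 0 * pvFc s N avg (i + (t : Int)) k :=
      Finset.sum_congr rfl (fun t ht => by rw [hc'ne t (by simp at ht; omega)])
    rw [hsum']
    ring
  -- step 2: expand pvFc at each non-last position
  have E2 : ∀ t ∈ Finset.range (m' + 1),
      c'.getD t 0 * pvFc s N avg (i + (t : Int)) k
        = c'.getD t 0 * ∑ u ∈ Finset.range (m' + 1), (if t ≤ u then X u else 0) := by
    intro t ht
    simp only [Finset.mem_range] at ht
    by_cases htm : t = m'
    · subst htm; rw [hc'self, zero_mul, zero_mul]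
    · have htlt : t < m' := by omega
      congr 1
      have hne : i + (t : Int) ≠ N := by omega
      rw [pvFc_expand s N avg _ k havg hne, PySem.List.pyRange_one]
      have harg : (N + 1 - (i + (t : Int))).toNat = m' + 1 - t := by omega
      rw [harg, List.map_map, pvSumList]
      have : ∀ r : Nat, (if PySem.List.pyGet? s (i + (t : Int) + (r : Int)) = some k
          then pvFc s N avg (i + (t : Int) + (r : Int)) (k + avg) else 0) = X (t + r) := by
        intro r; rw [hX]; push_cast; ring_nf
      calc ∑ r ∈ Finset.range (m' + 1 - t),
              ((fun j => if PySem.List.pyGet? s j = some k then pvFc s N avg j (k + avg) else 0) ∘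
                (fun r : Nat => i + (t : Int) + (r : Int))) r
          = ∑ r ∈ Finset.range (m' + 1 - t), X (t + r) := by
            refine Finset.sum_congr rfl fun r _ => ?_
            simp only [Function.comp]
            exact this r
        _ = ∑ u ∈ Finset.Ico t (m' + 1), X u := by
            rw [Finset.sum_Ico_eq_sum_range]
        _ = ∑ u ∈ Finset.range (m' + 1), (if t ≤ u then X u else 0) := by
            rw [← pvFilter_ge_range t (m' + 1) (by omega)]
            exact Finset.sum_filter _ _
  -- step 3: exchange the two sums
  have E3 : ∑ t ∈ Finset.range (m' + 1),
        c'.getD t 0 * ∑ u ∈ Finset.range (m' + 1), (if t ≤ u then X u else 0)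
      = ∑ u ∈ Finset.range (m' + 1),
          (∑ t ∈ Finset.range (u + 1), c'.getD t 0) * X u := by
    simp only [Finset.mul_sum]
    rw [Finset.sum_comm]
    refine Finset.sum_congr rfl fun u hu => ?_
    simp only [Finset.mem_range] at hu
    rw [Finset.sum_mul]
    have hfilter := pvFilter_le_range u (m' + 1) hu
    calc ∑ t ∈ Finset.range (m' + 1), c'.getD t 0 * (if t ≤ u then X u else 0)
        = ∑ t ∈ Finset.range (m' + 1), (if t ≤ u then c'.getD t 0 * X u else 0) := by
          refine Finset.sum_congr rfl fun t _ => ?_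
          split <;> simp
      _ = ∑ t ∈ Finset.range (u + 1), c'.getD t 0 * X u := by
          rw [← hfilter]
          exact (Finset.sum_filter _ _).symm
  -- step 4: the inner prefix sum is exactly pvStep
  have E4 : ∀ u ∈ Finset.range (m' + 1),
      (∑ t ∈ Finset.range (u + 1), c'.getD t 0) * X u
        = (pvStep s i k (m' + 1) c').getD u 0 * pvFc s N avg (i + (u : Int)) (k + avg) := by
    intro u hu
    simp only [Finset.mem_range] at hu
    rw [pvStep_getD s i k (m' + 1) c' u hu, hX]
    by_cases hmatch : PySem.List.pyGet? s (i + (u : Int)) = some k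
    · simp only [hmatch, if_pos]
    · simp [hmatch]
  rw [E1, Finset.sum_congr rfl E2, E3, Finset.sum_congr rfl E4]

lemma pvAll_zero_sum (m : Nat) (cnt : List Int) (h : ∀ t : Nat, cnt.getD t 0 = 0)
    (f : Nat → Int) : ∑ t ∈ Finset.range m, cnt.getD t 0 * f t = 0 := by
  refine Finset.sum_eq_zero fun t _ => by rw [h t, zero_mul]

lemma pvAny_false_all_zero (cnt : List Int) (h : cnt.any (fun c => c != 0) = false) :
    ∀ t : Nat, cnt.getD t 0 = 0 := by
  intro t
  rcases Nat.lt_or_ge t cnt.length with hlt | hge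
  · have := List.any_eq_false.mp h cnt[t] (List.getElem_mem hlt)
    rw [List.getD_eq_getElem?_getD, List.getElem?_eq_getElem hlt]
    simpa using this
  · rw [List.getD_eq_getElem?_getD, List.getElem?_eq_none hge]; rfl

lemma pvLoop_inv (s : List Int) (i N avg : Int) (m' : Nat) (havg : avg ≠ 0)
    (hm : ((m' : Int)) = N - i) (hiN : i < N) :
    ∀ fB : Nat, ∀ cnt : List Int, ∀ k total : Int, cnt.length = m' + 1 →
      ((∀ t : Nat, cnt.getD t 0 = 0) ∨ pvMeas s k avg < fB) →
      pvLoop s i N avg (m' + 1) fB cnt k total =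
        total + ∑ t ∈ Finset.range (m' + 1), cnt.getD t 0 * pvFc s N avg (i + (t : Int)) k := by
  intro fB
  induction fB with
  | zero =>
    intro cnt k total hlen hyp
    have hz : ∀ t : Nat, cnt.getD t 0 = 0 := hyp.resolve_right (by omega)
    rw [pvLoop, pvAll_zero_sum, add_zero]
    exact hz
  | succ fB ih =>
    intro cnt k total hlen hyp
    by_cases hany : cnt.any (fun c => c != 0) = true
    · rw [pvLoop, if_pos hany]
      have hnz : ¬ (∀ t : Nat, cnt.getD t 0 = 0) := by
        intro hall
        rcases List.any_eq_true.mp hany with ⟨c, hc, hcne⟩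
        rcases List.getElem_of_mem hc with ⟨idx, hidx, rfl⟩
        have := hall idx
        rw [List.getD_eq_getElem?_getD, List.getElem?_eq_getElem hidx] at this
        simp at this hcne
        exact hcne this
      have hmeas : pvMeas s k avg < fB + 1 := hyp.resolve_left hnz
      have hsucc : m' + 1 - 1 = m' := by omega
      rw [hsucc]
      rw [ih (pvStep s i k (m' + 1) (cnt.set m' 0)) (k + avg) (total + cnt.getD m' 0)
        (pvStep_len _ _ _ _ _) ?hyp']
      case hyp' =>
        by_cases hstep : ∀ t : Nat, (pvStep s i k (m' + 1) (cnt.set m' 0)).getD t 0 = 0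
        · exact Or.inl hstep
        · right
          push_neg at hstep
          rcases hstep with ⟨u, hu⟩
          have humem : u < m' + 1 := by
            by_contra hge
            exact hu (pvStep_getD_zero s i k (m' + 1) _ u (by omega))
          rw [pvStep_getD s i k (m' + 1) _ u humem] at hu
          have hmatch : PySem.List.pyGet? s (i + (u : Int)) = some k := by
            by_contra hn
            exact hu (by rw [if_neg hn])
          have hks : k ∈ s := PySem.List.mem_of_pyGet?_eq_some _ hmatch
          have := pvMeas_lt s k avg havg hks
          omega
      rw [pvSum_step s i N avg k m' havg hm cnt hlen]
      ring
    · have hfalse : cnt.any (fun c => c != 0) = false := by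
        cases h : cnt.any (fun c => c != 0)
        · rfl
        · exact absurd h hany
      have hz := pvAny_false_all_zero cnt hfalse
      rw [pvLoop, if_neg (by simp [hfalse]), pvAll_zero_sum _ _ hz, add_zero]

lemma pvFA_succ_N (s : List Int) (N avg key : Int) (f : Nat) :
    pvFA s N avg (f + 1) N key = 1 := by simp [pvFA]

lemma pvFA_succ_gt (s : List Int) (N avg i key : Int) (f : Nat) (h : N < i) :
    pvFA s N avg (f + 1) i key = 0 := by
  rw [pvFA, if_neg (by omega), PySem.List.pyRange_one_eq_nil (by omega)]
  rfl

lemma pvFA_succ_sum (s : List Int) (N avg i key : Int) (f : Nat) (hiN : i ≠ N) :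
    pvFA s N avg (f + 1) i key =
      ((PySem.List.pyRange i (N + 1) 1).map
        (fun j => if PySem.List.pyGet? s j = some key then pvFA s N avg f j (key + avg) else 0)).sum := by
  rw [pvFA, if_neg hiN]
  rw [PySem.List.foldl_congr_mem (g := fun total j =>
    total + (if PySem.List.pyGet? s j = some key then pvFA s N avg f j (key + avg) else 0))]
  · rw [PySem.List.foldl_add]; simp
  · intro acc j hj
    split <;> simp

lemma pvAll_zero_any_false (cnt : List Int) (h : ∀ t : Nat, cnt.getD t 0 = 0) :
    cnt.any (fun c => c != 0) = false := by
  rw [List.any_eq_false]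
  intro x hx
  rcases List.getElem_of_mem hx with ⟨idx, hidx, rfl⟩
  have := h idx
  rw [List.getD_eq_getElem?_getD, List.getElem?_eq_getElem hidx] at this
  simpa using this

lemma pvLoop_zero (s : List Int) (i N avg : Int) (m : Nat) (fB : Nat) (cnt : List Int)
    (k total : Int) (h : ∀ t : Nat, cnt.getD t 0 = 0) :
    pvLoop s i N avg m fB cnt k total = total := by
  cases fB with
  | zero => rfl
  | succ fB => rw [pvLoop, if_neg (by rw [pvAll_zero_any_false cnt h]; simp)]

lemma pvAny_of_getD (cnt : List Int) (t : Nat) (h : t < cnt.length)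
    (hne : cnt.getD t 0 ≠ 0) : cnt.any (fun c => c != 0) = true := by
  rw [List.getD_eq_getElem?_getD, List.getElem?_eq_getElem h] at hne
  exact List.any_eq_true.mpr ⟨cnt[t], List.getElem_mem h, by simpa using hne⟩

-- the main equivalence
lemma pvMain : ∀ (sum_list : List Int) (i N key avg : Int),
    Pre_check_root sum_list i N key avg →
    check_root sum_list i N key avg = check_root_alt sum_list i N key avg := by
  intro s i N key avg hpre
  rw [check_root, check_root_alt]
  by_cases hge : N ≤ i
  · -- i ≥ N : both trivial
    rw [if_pos hge]
    by_cases heq : i = N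
    · rw [if_pos heq, heq, pvFA_succ_N]
    · rw [if_neg heq, pvFA_succ_gt s N avg i key _ (by omega)]
  · have hiN : i < N := by omega
    rw [if_neg (by omega)]
    set m' : Nat := (N - i).toNat with hm'
    have hm : ((m' : Int)) = N - i := by omega
    have hmrw : (N - i + 1).toNat = m' + 1 := by omega
    rw [hmrw]
    have hcnt0 : (List.replicate (m' + 1) (0 : Int)).set 0 1 = 1 :: List.replicate m' 0 := by
      rw [List.replicate_succ]; rfl
    have hlen0 : ((List.replicate (m' + 1) (0 : Int)).set 0 1).length = m' + 1 := by simp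
    have hget0 : ∀ t : Nat, ((List.replicate (m' + 1) (0 : Int)).set 0 1).getD t 0
        = if t = 0 then 1 else 0 := by
      intro t
      rw [hcnt0]
      cases t with
      | zero => rfl
      | succ t =>
        simp only [List.getD_eq_getElem?_getD, List.getElem?_cons_succ, if_neg (Nat.succ_ne_zero t)]
        rcases Nat.lt_or_ge t m' with h | h
        · rw [List.getElem?_replicate_of_lt h]; rfl
        · rw [List.getElem?_eq_none (by simpa using h)]; rfl
    rcases em (avg = 0) with havg0 | havg
    · -- avg = 0 : Pre gives no match strictly before N
      have hval : -(s.length : Int) ≤ i ∧ N < (s.length : Int) ∧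
          (avg ≠ 0 ∨ ∀ j ∈ PySem.List.pyRange i N 1, PySem.List.pyGet? s j ≠ some key) := by
        rcases hpre with h | h
        · omega
        · exact h
      have hnm : ∀ j ∈ PySem.List.pyRange i N 1, PySem.List.pyGet? s j ≠ some key :=
        hval.2.2.resolve_left (by simp [havg0])
      have hlens : 1 ≤ s.length := by
        have h1 := hval.1; have h2 := hval.2.1; omega
      subst havg0
      -- A's value
      have hA : pvFA s N 0 (s.length + 2) i key
          = if PySem.List.pyGet? s N = some key then 1 else 0 := by
        have h2 : s.length + 2 = (s.length + 1) + 1 := rfl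
        rw [h2, pvFA_succ_sum s N 0 i key (s.length + 1) (by omega)]
        rw [PySem.List.pyRange_one_succ_right (by omega), List.map_append, List.sum_append]
        have hz : ((PySem.List.pyRange i N 1).map
            (fun j => if PySem.List.pyGet? s j = some key then pvFA s N 0 (s.length + 1) j (key + 0) else 0)).sum = 0 := by
          apply List.sum_eq_zero
          intro x hx
          rcases List.mem_map.mp hx with ⟨j, hj, rfl⟩
          rw [if_neg (hnm j hj)]
        rw [hz, zero_add]
        have hl1 : s.length + 1 = s.length + 1 := rfl
        obtain ⟨l', hl'⟩ : ∃ l', s.length = l' + 1 := ⟨s.length - 1, by omega⟩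
        rw [List.map_cons, List.map_nil, List.sum_cons, List.sum_nil, add_zero]
        split
        · rw [hl']
          rw [show l' + 1 + 1 = (l' + 1) + 1 from rfl, pvFA_succ_N]
        · rfl
      rw [hA]
      have hm'pos : 1 ≤ m' := by omega
      have hNidx : i + ((m' : Nat) : Int) = N := by omega
      obtain ⟨l', hl'⟩ : ∃ l', s.length = l' + 1 := ⟨s.length - 1, by omega⟩
      set cnt0 : List Int := (List.replicate (m' + 1) (0 : Int)).set 0 1 with hc0def
      have hany0 : cnt0.any (fun c => c != 0) = true :=
        pvAny_of_getD cnt0 0 (by rw [hlen0]; omega) (by rw [hget0 0]; simp)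
      have hgetc0' : ∀ t : Nat, (cnt0.set m' 0).getD t 0 = if t = 0 then 1 else 0 := by
        intro t
        by_cases htm : t = m'
        · subst htm
          rw [List.getD_eq_getElem?_getD, List.getElem?_set_self (by rw [hlen0]; omega)]
          rw [if_neg (by omega)]
          rfl
        · rw [List.getD_eq_getElem?_getD, List.getElem?_set_ne (by omega),
            ← List.getD_eq_getElem?_getD, hget0 t]
      have hprefix : ∀ u : Nat, ∑ t ∈ Finset.range (u + 1), (cnt0.set m' 0).getD t 0 = 1 := by
        intro u
        rw [Finset.sum_eq_single 0]
        · rw [hgetc0' 0, if_pos rfl]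
        · intro t ht htne; rw [hgetc0' t, if_neg htne]
        · intro h; simp at h
      have hmatchlt : ∀ u : Nat, u < m' → PySem.List.pyGet? s (i + (u : Int)) ≠ some key := by
        intro u hu
        apply hnm
        rw [PySem.List.mem_pyRange_one]
        omega
      set cnt1 : List Int := pvStep s i key (m' + 1) (cnt0.set m' 0) with hc1def
      have hget1 : ∀ u : Nat, u < m' + 1 →
          cnt1.getD u 0 = if PySem.List.pyGet? s (i + (u : Int)) = some key then 1 else 0 := by
        intro u hu
        rw [hc1def, pvStep_getD s i key (m' + 1) _ u hu, hprefix u]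
      have hfuel : s.length + 2 = (l' + 2) + 1 := by omega
      rw [hfuel, pvLoop, if_pos hany0]
      rw [show m' + 1 - 1 = m' from rfl]
      rw [show (0 : Int) + cnt0.getD m' 0 = 0 by rw [hget0 m', if_neg (by omega)]; ring]
      rw [show key + (0 : Int) = key from add_zero key]
      by_cases hmatchN : PySem.List.pyGet? s N = some key
      · -- the single chain i → N of length 1
        have hany1 : cnt1.any (fun c => c != 0) = true := by
          apply pvAny_of_getD cnt1 m' (by rw [hc1def, pvStep_len]; omega)
          rw [hget1 m' (by omega), hNidx, if_pos hmatchN]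
          simp
        rw [pvLoop, if_pos hany1]
        rw [show m' + 1 - 1 = m' from rfl]
        rw [show (0 : Int) + cnt1.getD m' 0 = 1 by
          rw [hget1 m' (by omega), hNidx, if_pos hmatchN]; ring]
        have hgetc1' : ∀ t : Nat, (cnt1.set m' 0).getD t 0 = 0 := by
          intro t
          by_cases htm : t = m'
          · subst htm
            rw [List.getD_eq_getElem?_getD,
              List.getElem?_set_self (by rw [hc1def, pvStep_len]; omega)]
            rfl
          · rw [List.getD_eq_getElem?_getD, List.getElem?_set_ne (by omega),
              ← List.getD_eq_getElem?_getD]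
            rcases Nat.lt_or_ge t (m' + 1) with hlt | hge
            · rw [hget1 t hlt, if_neg (hmatchlt t (by omega))]
            · rw [List.getD_eq_getElem?_getD,
                List.getElem?_eq_none (by rw [hc1def, pvStep_len]; omega)]
              rfl
        have hget2 : ∀ t : Nat, (pvStep s i key (m' + 1) (cnt1.set m' 0)).getD t 0 = 0 := by
          intro t
          rcases Nat.lt_or_ge t (m' + 1) with hlt | hge
          · rw [pvStep_getD s i key (m' + 1) _ t hlt]
            rw [Finset.sum_eq_zero (fun x _ => hgetc1' x)]
            split <;> rfl
          · exact pvStep_getD_zero s i key (m' + 1) _ t hge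
        rw [pvLoop_zero s i N 0 (m' + 1) _ _ _ _ hget2, if_pos hmatchN]
      · -- no chain at all: the new level is all zero
        have hget1z : ∀ t : Nat, cnt1.getD t 0 = 0 := by
          intro t
          rcases Nat.lt_or_ge t (m' + 1) with hlt | hge
          · rw [hget1 t hlt]
            rcases Nat.lt_or_ge t m' with hlt' | hge'
            · rw [if_neg (hmatchlt t hlt')]
            · have : t = m' := by omega
              subst this
              rw [hNidx, if_neg hmatchN]
          · rw [List.getD_eq_getElem?_getD,
              List.getElem?_eq_none (by rw [hc1def, pvStep_len]; omega)]
            rfl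
        rw [pvLoop_zero s i N 0 (m' + 1) _ _ _ _ hget1z, if_neg hmatchN]
    · -- avg ≠ 0 : the invariant
      have hmeas2 : pvMeas s key avg < s.length + 2 := by
        have := pvMeas_le s key avg; omega
      rw [pvLoop_inv s i N avg m' havg hm hiN (s.length + 2) _ key 0 hlen0 (Or.inr hmeas2)]
      have hsum : ∑ t ∈ Finset.range (m' + 1),
          ((List.replicate (m' + 1) (0 : Int)).set 0 1).getD t 0 * pvFc s N avg (i + (t : Int)) key
          = pvFc s N avg i key := by
        rw [Finset.sum_eq_single 0]
        · rw [hget0 0, if_pos rfl, one_mul]; norm_num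
        · intro t ht htne
          rw [hget0 t, if_neg htne, zero_mul]
        · intro h; simp at h
      rw [hsum, zero_add, pvFc]
      exact pvFA_stable s N avg havg _ _ i key hmeas2 (by omega)

-- ===== VERDICT (by name: the statement is the Claim_ definition above) =====
theorem check_root_spec : Claim_equal_check_root := by
  intro sum_list i N key avg _hdom hpre
  unfold Spec_check_root
  exact pvMain sum_list i N key avg hpre
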